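-- pv_equiv track=rewrite | github.com/nabeelahmdrana/research-paper-assistant-for-professors | backend/app/agents/analysis_agent.py | _find_string_end
-- ===== SOURCE A (Python) =====
-- def _find_string_end(text: str) -> int:
--     """Return the index of the first unescaped closing quote in *text*.
--
--     *text* must start immediately after the opening quote of a JSON string
--     value (i.e. the opening quote itself has already been consumed).
--
--     Returns -1 when no closing quote has been received yet (partial stream).
--     """
--     i = 0
--     while i < len(text):
--         ch = text[i]
--         if ch == "\\":
--             i += 2  # skip the escaped character
--         elif ch == '"':
--             return i
--         else:
--             i += 1
--     return -1
-- ===== SOURCE B (Python) =====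
-- def _find_string_end(text: str) -> int:
--     """Jump between quote candidates with str.find; a quote closes the
--     string iff the run of backslashes immediately before it has even length."""
--     j = text.find('"')
--     while j != -1:
--         k = j
--         while k > 0 and text[k - 1] == "\\":
--             k -= 1
--         if (j - k) % 2 == 0:
--             return j
--         j = text.find('"', j + 1)
--     return -1
-- ===== Notes on version B (the rewrite author's own statement) =====
-- stated objective: faster
-- what changed: Instead of A's character-by-character scan that hops two indices over escapes, B jumps directly between quote candidates with str.find (a C-level scan) and accepts a quote iff the run of backslashes immediately preceding it has even length.
import Mathlib
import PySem

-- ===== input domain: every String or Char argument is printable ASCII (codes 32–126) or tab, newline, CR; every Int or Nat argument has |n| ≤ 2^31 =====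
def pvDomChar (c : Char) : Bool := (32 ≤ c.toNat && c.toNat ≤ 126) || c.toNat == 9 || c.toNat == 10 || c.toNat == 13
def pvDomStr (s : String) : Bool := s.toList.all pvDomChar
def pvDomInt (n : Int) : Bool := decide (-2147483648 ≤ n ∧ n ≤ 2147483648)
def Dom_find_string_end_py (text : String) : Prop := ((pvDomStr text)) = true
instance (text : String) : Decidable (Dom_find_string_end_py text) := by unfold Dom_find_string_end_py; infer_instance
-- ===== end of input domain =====

-- B replaces A's char-by-char scan (which hops two indices over escapes) by a scan over quote
-- candidates found with str.find, accepting a quote iff its preceding backslash run has even length.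

-- ===== PORT A =====
-- A's while loop: on '\' advance i by 2 (skipping the escaped char), on '"' return i, else advance by 1; -1 at end.
def findA (l : List Char) (i : Int) : Int :=
  match l with
  | [] => -1
  | c :: rest =>
    if c = '\\' then findA rest.tail (i + 2)
    else if c = '"' then i
    else findA rest (i + 1)
termination_by l.length
decreasing_by
  · simp [List.length_tail]
  · simp

def find_string_end_py (text : String) : Int := findA text.toList 0

-- ===== PORT B =====
-- B's inner while loop: `while k > 0 and text[k-1] == "\\": k -= 1` (k starts at j).
def bsStart (l : List Char) (k : Nat) : Nat :=
  match k with
  | 0 => 0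
  | Nat.succ k' => if PySem.List.pyGet? l (k' : Int) = some '\\' then bsStart l k' else k' + 1

-- B's outer while loop over quote candidates; fuel only makes the recursion structural
-- (each step moves j strictly right, so l.length steps suffice).
def scanB (l : List Char) (fuel : Nat) (j : Nat) : Int :=
  if (j - bsStart l j) % 2 = 0 then (j : Int)
  else
    match fuel with
    | 0 => -1
    | fuel' + 1 =>
      let n := PySem.Chars.findFrom l ['"'] ((j : Int) + 1) none
      if n = -1 then -1 else scanB l fuel' n.toNat

def find_string_end_py_alt (text : String) : Int :=
  let l := text.toList
  let j := PySem.Chars.find l ['"']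
  if j = -1 then -1 else scanB l l.length j.toNat

-- ===== PRECONDITION & SPEC =====
def Spec_find_string_end_py (text : String) (out : Int) : Prop := out = find_string_end_py_alt text
instance (text : String) (out : Int) : Decidable (Spec_find_string_end_py text out) := by unfold Spec_find_string_end_py; infer_instance

-- ===== CLAIM =====
def Claim_equal_find_string_end_py : Prop := ∀ (text : String), Dom_find_string_end_py text → Spec_find_string_end_py text (find_string_end_py text)

-- ===== LEMMAS AND PROOFS =====

-- `Good l j`: position j holds a quote preceded by an even-length backslash run.
def Good (l : List Char) (j : Nat) : Prop := l[j]? = some '"' ∧ (j - bsStart l j) % 2 = 0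

-- the common specification both programs satisfy: result is -1 with no good position, or the first good position
def FirstGood (l : List Char) (r : Int) : Prop :=
  (r = -1 ∧ ∀ j, ¬ Good l j) ∨ (∃ j : Nat, r = j ∧ Good l j ∧ ∀ i < j, ¬ Good l i)

theorem firstGood_unique {l : List Char} {r r' : Int} (h : FirstGood l r) (h' : FirstGood l r') : r = r' := by
  rcases h with ⟨h1, h2⟩ | ⟨j, hj, hg, hmin⟩
  · rcases h' with ⟨h1', _⟩ | ⟨j', hj', hg', _⟩
    · omega
    · exact absurd hg' (h2 j')
  · rcases h' with ⟨h1', h2'⟩ | ⟨j', hj', hg', hmin'⟩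
    · exact absurd hg (h2' j)
    · rcases Nat.lt_trichotomy j j' with h | h | h
      · exact absurd hg (hmin' j h)
      · omega
      · exact absurd hg' (hmin j' h)

theorem bsStart_le (l : List Char) (k : Nat) : bsStart l k ≤ k := by
  induction k with
  | zero => simp [bsStart]
  | succ k' ih =>
    simp only [bsStart]
    split
    · omega
    · omega

theorem bsStart_cons (c : Char) (l : List Char) (j : Nat) :
    bsStart (c :: l) (j + 1) = if bsStart l j = 0 then (if c = '\\' then 0 else 1) else bsStart l j + 1 := by
  induction j with
  | zero =>
    have h := PySem.List.pyGet?_natCast (c :: l) 0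
    norm_num at h
    by_cases hc : c = '\\' <;> simp [bsStart, h, hc]
  | succ j' ih =>
    have hget : PySem.List.pyGet? (c :: l) ((j' + 1 : Nat) : Int) = l[j']? := by
      rw [PySem.List.pyGet?_natCast]; simp
    have hget' : PySem.List.pyGet? l ((j' : Nat) : Int) = l[j']? := PySem.List.pyGet?_natCast l j'
    by_cases hbs : l[j']? = some '\\'
    · have l1 : bsStart (c :: l) (j' + 1 + 1) = bsStart (c :: l) (j' + 1) := by
        simp only [bsStart]; push_cast at hget ⊢; rw [hget]; simp [hbs]
      have l2 : bsStart l (j' + 1) = bsStart l j' := by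
        simp only [bsStart]; rw [hget']; simp [hbs]
      rw [l1, l2, ih]
    · have l1 : bsStart (c :: l) (j' + 1 + 1) = j' + 2 := by
        simp only [bsStart]; push_cast at hget ⊢; rw [hget]; simp [hbs]
      have l2 : bsStart l (j' + 1) = j' + 1 := by
        simp only [bsStart]; rw [hget']; simp [hbs]
      rw [l1, l2]; simp

theorem good_zero (c : Char) (l : List Char) : Good (c :: l) 0 ↔ c = '"' := by
  simp [Good, bsStart]

theorem good_shift1 {c : Char} (hc : c ≠ '\\') (l : List Char) (j : Nat) :
    Good (c :: l) (j + 1) ↔ Good l j := by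
  have hle := bsStart_le l j
  unfold Good
  rw [bsStart_cons, List.getElem?_cons_succ]
  by_cases h0 : bsStart l j = 0
  · rw [if_pos h0, if_neg hc]
    constructor <;> (rintro ⟨h1, h2⟩; exact ⟨h1, by omega⟩)
  · rw [if_neg h0]
    constructor <;> (rintro ⟨h1, h2⟩; exact ⟨h1, by omega⟩)

theorem good_shift2 (d : Char) (l : List Char) (j : Nat) :
    Good ('\\' :: d :: l) (j + 2) ↔ Good l j := by
  have hle := bsStart_le l j
  have hle2 := bsStart_le (d :: l) (j + 1)
  unfold Good
  have e1 : ('\\' :: d :: l)[j + 2]? = l[j]? := by simp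
  rw [e1]
  have e2 : bsStart ('\\' :: d :: l) (j + 2) =
      if bsStart (d :: l) (j + 1) = 0 then 0 else bsStart (d :: l) (j + 1) + 1 := by
    have := bsStart_cons '\\' (d :: l) (j + 1)
    simpa using this
  by_cases h0 : bsStart l j = 0
  · by_cases hd : d = '\\'
    · have eB1 : bsStart (d :: l) (j + 1) = 0 := by rw [bsStart_cons]; simp [h0, hd]
      have eOut : bsStart ('\\' :: d :: l) (j + 2) = 0 := by rw [e2, eB1]; simp
      rw [eOut]
      constructor <;> (rintro ⟨h1, h2⟩; exact ⟨h1, by omega⟩)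
    · have eB1 : bsStart (d :: l) (j + 1) = 1 := by rw [bsStart_cons]; simp [h0, hd]
      have eOut : bsStart ('\\' :: d :: l) (j + 2) = 2 := by rw [e2, eB1]; simp
      rw [eOut]
      constructor <;> (rintro ⟨h1, h2⟩; exact ⟨h1, by omega⟩)
  · have eB1 : bsStart (d :: l) (j + 1) = bsStart l j + 1 := by rw [bsStart_cons]; simp [h0]
    have eOut : bsStart ('\\' :: d :: l) (j + 2) = bsStart l j + 2 := by rw [e2, eB1]; simp
    rw [eOut]
    constructor <;> (rintro ⟨h1, h2⟩; exact ⟨h1, by omega⟩)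

theorem good_bs1 (d : Char) (l : List Char) : ¬ Good ('\\' :: d :: l) 1 := by
  rintro ⟨h1, h2⟩
  have h := PySem.List.pyGet?_natCast ('\\' :: d :: l) 0
  norm_num at h
  have : bsStart ('\\' :: d :: l) 1 = 0 := by simp [bsStart, h]
  omega

theorem good_bs_nil : ∀ j, ¬ Good ['\\'] j := by
  intro j
  match j with
  | 0 => rintro ⟨h1, _⟩; simp at h1
  | j + 1 => rintro ⟨h1, _⟩; simp at h1

theorem findA_fg : ∀ (n : Nat) (l : List Char), l.length ≤ n → ∀ i : Int,
    (findA l i = -1 ∧ ∀ j, ¬ Good l j) ∨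
    (∃ j : Nat, findA l i = i + j ∧ Good l j ∧ ∀ i' < j, ¬ Good l i') := by
  intro n
  induction n with
  | zero =>
    intro l hl i
    have : l = [] := by cases l <;> simp_all
    subst this
    left; exact ⟨by simp [findA], by rintro j ⟨h, _⟩; simp at h⟩
  | succ n ih =>
    intro l hl i
    match l with
    | [] => left; exact ⟨by simp [findA], by rintro j ⟨h, _⟩; simp at h⟩
    | c :: rest =>
      by_cases hc : c = '\\'
      · subst hc
        match rest with
        | [] =>
          left
          refine ⟨by simp [findA], good_bs_nil⟩
        | d :: rest' =>
          have hA : findA ('\\' :: d :: rest') i = findA rest' (i + 2) := by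
            simp [findA]
          have hlen : rest'.length ≤ n := by simp at hl; omega
          rcases ih rest' hlen (i + 2) with ⟨h1, h2⟩ | ⟨j, hj, hg, hmin⟩
          · left
            refine ⟨by rw [hA]; exact h1, ?_⟩
            intro j
            match j with
            | 0 => rintro ⟨h, _⟩; simp at h
            | 1 => exact good_bs1 d rest'
            | j + 2 => rw [good_shift2]; exact h2 j
          · right
            refine ⟨j + 2, by rw [hA, hj]; push_cast; ring, (good_shift2 d rest' j).mpr hg, ?_⟩
            intro i' hi'
            match i' with
            | 0 => rintro ⟨h, _⟩; simp at h
            | 1 => exact good_bs1 d rest'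
            | i' + 2 => rw [good_shift2]; exact hmin i' (by omega)
      · by_cases hq : c = '"'
        · right
          refine ⟨0, ?_, ?_, by omega⟩
          · simp [findA, hq]
          · exact (good_zero c rest).mpr hq
        · have hA : findA (c :: rest) i = findA rest (i + 1) := by
            simp [findA, hc, hq]
          have hlen : rest.length ≤ n := by simp at hl; omega
          rcases ih rest hlen (i + 1) with ⟨h1, h2⟩ | ⟨j, hj, hg, hmin⟩
          · left
            refine ⟨by rw [hA]; exact h1, ?_⟩
            intro j
            match j with
            | 0 => rw [good_zero]; exact hq
            | j + 1 => rw [good_shift1 hc]; exact h2 j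
          · right
            refine ⟨j + 1, by rw [hA, hj]; push_cast; ring, (good_shift1 hc rest j).mpr hg, ?_⟩
            intro i' hi'
            match i' with
            | 0 => rw [good_zero]; exact hq
            | i' + 1 => rw [good_shift1 hc]; exact hmin i' (by omega)

theorem findA_firstGood (l : List Char) : FirstGood l (findA l 0) := by
  rcases findA_fg l.length l le_rfl 0 with ⟨h1, h2⟩ | ⟨j, hj, hg, hmin⟩
  · exact Or.inl ⟨h1, h2⟩
  · exact Or.inr ⟨j, by omega, hg, hmin⟩

theorem singleton_prefix_drop (l : List Char) (i : Nat) (a : Char) :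
    [a] <+: l.drop i ↔ l[i]? = some a := by
  rw [← List.head?_drop]
  constructor
  · rintro ⟨t, ht⟩; rw [← ht]; rfl
  · intro h
    cases hm : l.drop i with
    | nil => rw [hm] at h; simp at h
    | cons b t => rw [hm] at h; simp at h; exact ⟨t, by simp [h]⟩

theorem not_good_no_quote {l : List Char} {j : Nat}
    (h : ¬ ['"'] <:+: l.drop j) : ∀ i, j ≤ i → ¬ Good l i := by
  intro i hij hg
  apply h
  have hp : ['"'] <+: l.drop i := (singleton_prefix_drop l i '"').mpr hg.1
  have hs : l.drop i <:+ l.drop j := by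
    have : l.drop i = (l.drop j).drop (i - j) := by
      rw [List.drop_drop]; congr 1; omega
    rw [this]; exact List.drop_suffix _ _
  exact hp.isInfix.trans hs.isInfix

theorem scanB_firstGood : ∀ (fuel : Nat), ∀ (j : Nat) (l : List Char),
    l[j]? = some '"' → (∀ i < j, ¬ Good l i) → l.length ≤ fuel + j →
    FirstGood l (scanB l fuel j) := by
  intro fuel
  induction fuel with
  | zero =>
    intro j l hq hmin hlen
    have : j < l.length := by
      have := List.getElem?_eq_some_iff.mp hq
      exact this.1
    omega
  | succ fuel ih =>
    intro j l hq hmin hlen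
    have hjlt : j < l.length := (List.getElem?_eq_some_iff.mp hq).1
    by_cases hpar : (j - bsStart l j) % 2 = 0
    · right
      refine ⟨j, by simp [scanB, hpar], ⟨hq, hpar⟩, hmin⟩
    · have hnotg : ¬ Good l j := fun hg => hpar hg.2
      have hmin' : ∀ i < j + 1, ¬ Good l i := by
        intro i hi
        rcases Nat.lt_or_ge i j with h | h
        · exact hmin i h
        · have : i = j := by omega
          subst this; exact hnotg
      have hcast : ((j : Int) + 1) = ((j + 1 : Nat) : Int) := by push_cast; ring
      have hk : j + 1 ≤ l.length := by omega
      have hB : scanB l (fuel + 1) j =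
          (if PySem.Chars.findFrom l ['"'] ((j : Int) + 1) none = -1 then -1
           else scanB l fuel (PySem.Chars.findFrom l ['"'] ((j : Int) + 1) none).toNat) := by
        simp [scanB, hpar]
      by_cases hfind : PySem.Chars.findFrom l ['"'] ((j : Int) + 1) none = -1
      · rw [hB, if_pos hfind]
        left
        refine ⟨rfl, ?_⟩
        have hno : ¬ ['"'] <:+: l.drop (j + 1) := by
          rw [hcast] at hfind
          exact (PySem.Chars.findFrom_natCast_eq_neg_one_iff l ['"'] (j + 1) hk).mp hfind
        intro i
        rcases Nat.lt_or_ge i (j + 1) with h | h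
        · exact hmin' i h
        · exact not_good_no_quote hno i h
      · rw [hB, if_neg hfind]
        rw [hcast] at hfind
        obtain ⟨hge, hpre, hfmin⟩ := PySem.Chars.findFrom_natCast_spec l ['"'] (j + 1) hk hfind
        set m := (PySem.Chars.findFrom l ['"'] ((j + 1 : Nat) : Int) none).toNat with hm
        have hmq : l[m]? = some '"' := (singleton_prefix_drop l m '"').mp hpre
        have hjm : j + 1 ≤ m := by omega
        have hminm : ∀ i < m, ¬ Good l i := by
          intro i hi
          rcases Nat.lt_or_ge i (j + 1) with h | h
          · exact hmin' i h
          · intro hg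
            exact hfmin i h hi ((singleton_prefix_drop l i '"').mpr hg.1)
        rw [hcast]
        exact ih m l hmq hminm (by omega)

theorem alt_firstGood (text : String) : FirstGood text.toList (find_string_end_py_alt text) := by
  unfold find_string_end_py_alt
  set l := text.toList with hl
  by_cases hfind : PySem.Chars.find l ['"'] = -1
  · simp only [hfind, if_pos]
    left
    refine ⟨by simp, ?_⟩
    have hno : ¬ ['"'] <:+: l := (PySem.Chars.find_eq_neg_one_iff l ['"']).mp hfind
    have := not_good_no_quote (l := l) (j := 0) (by simpa using hno)
    intro j; exact this j (Nat.zero_le j)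
  · simp only [hfind, ite_false]
    have hpos : 0 ≤ PySem.Chars.find l ['"'] := by
      have := PySem.Chars.neg_one_le_find l ['"']
      omega
    obtain ⟨hpre, hfmin⟩ := PySem.Chars.find_spec (s := l) (sub := ['"']) hpos
    set j := (PySem.Chars.find l ['"']).toNat with hj
    have hq : l[j]? = some '"' := by
      have : ['"'] <+: l.drop j := by simpa using hpre
      exact (singleton_prefix_drop l j '"').mp this
    have hmin : ∀ i < j, ¬ Good l i := by
      intro i hi hg
      exact hfmin i hi (by simpa using (singleton_prefix_drop l i '"').mpr hg.1)
    exact scanB_firstGood l.length j l hq hmin (by omega)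

-- ===== VERDICT =====
theorem find_string_end_py_spec : Claim_equal_find_string_end_py := by
  intro text _
  unfold Spec_find_string_end_py find_string_end_py
  exact firstGood_unique (findA_firstGood text.toList) (alt_firstGood text)
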